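-- pv_equiv track=rewrite | github.com/you2zz/test_development | task_1.py | unique_names_of_teaches
-- ===== SOURCE A (Python) =====
-- def unique_names_of_teaches(mentors) -> str:
--
--     all_list = []
--     for m in mentors:
--       all_list.extend(m)
--
--     all_names_list = []
--     for mentor in all_list:
--         name = mentor.split()[0]
--         all_names_list.append(name)
--
--     unique_names = set(all_names_list)
--     all_names_sorted = sorted(unique_names)
--     # all_names_sorted = unique_names
--
--     return f'Уникальные имена преподавателей: {", ".join(all_names_sorted)}'
-- ===== SOURCE B (Python) =====
-- def unique_names_of_teaches(mentors) -> str: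
--     firsts = sorted(s.split()[0] for m in mentors for s in m)
--     collapsed = []
--     for name in firsts:
--         if collapsed == [] or collapsed[-1] != name:
--             collapsed.append(name)
--     return f'Уникальные имена преподавателей: {", ".join(collapsed)}'
-- ===== Notes on version B (the rewrite author's own statement) =====
-- stated objective: alternative
-- what changed: B drops the hash set entirely: it sorts the full list of first tokens (duplicates included) in one pass over the flattened input and deduplicates by comparing each sorted name with the last kept one, instead of A's build-a-set-then-sort-the-set pipeline.
import Mathlib
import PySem

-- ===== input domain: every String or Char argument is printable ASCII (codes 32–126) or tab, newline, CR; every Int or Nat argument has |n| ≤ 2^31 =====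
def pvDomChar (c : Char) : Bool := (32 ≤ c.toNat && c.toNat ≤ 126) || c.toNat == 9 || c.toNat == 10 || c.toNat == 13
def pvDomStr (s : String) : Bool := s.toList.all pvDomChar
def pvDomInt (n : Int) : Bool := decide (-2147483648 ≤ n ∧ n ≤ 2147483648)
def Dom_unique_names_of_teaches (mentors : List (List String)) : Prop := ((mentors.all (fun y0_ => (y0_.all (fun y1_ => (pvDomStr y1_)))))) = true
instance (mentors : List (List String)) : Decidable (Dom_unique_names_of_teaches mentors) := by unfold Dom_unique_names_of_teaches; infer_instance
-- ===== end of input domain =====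

-- B replaces A's set-then-sort pipeline with sort-all-tokens-then-adjacent-dedup (alternative decomposition, same cost).

-- ===== PORT A =====
def unique_names_of_teaches (mentors : List (List String)) : String :=
  let all_list := mentors.foldl (fun acc m => acc ++ m) []
  let all_names_list := all_list.foldl
    (fun acc mentor => acc ++ [((PySem.List.pyGet? (PySem.Str.split₀ mentor) 0).getD "")]) []
  let unique_names := PySem.Set.ofList all_names_list
  let all_names_sorted := PySem.List.sorted unique_names (fun x => x) false
  "Уникальные имена преподавателей: " ++ PySem.Str.join ", " all_names_sorted

-- ===== PORT B =====
def unique_names_of_teaches_alt (mentors : List (List String)) : String :=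
  let firsts := PySem.List.sorted
    (mentors.flatMap (fun m => m.map (fun s => ((PySem.List.pyGet? (PySem.Str.split₀ s) 0).getD ""))))
    (fun x => x) false
  let collapsed := firsts.foldl
    (fun acc name => if acc = [] ∨ acc.getLast? ≠ some name then acc ++ [name] else acc) []
  "Уникальные имена преподавателей: " ++ PySem.Str.join ", " collapsed

-- ===== PRECONDITION & SPEC =====
-- Pre_ excludes exactly the inputs on which the Python A raises IndexError: some string whose
-- .split() is empty (empty or all-whitespace), where 'mentor.split()[0]' has no element 0.
def Pre_unique_names_of_teaches (mentors : List (List String)) : Prop :=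
  ∀ m ∈ mentors, ∀ s ∈ m, PySem.Str.split₀ s ≠ []
instance (mentors : List (List String)) : Decidable (Pre_unique_names_of_teaches mentors) := by
  unfold Pre_unique_names_of_teaches; infer_instance
def pvWitness_unique_names_of_teaches : List (List String) :=
  [["Alice Smith", "Bob"], ["Alice Jones"]]
def Spec_unique_names_of_teaches (mentors : List (List String)) (out : String) : Prop := out = unique_names_of_teaches_alt mentors
instance (mentors : List (List String)) (out : String) : Decidable (Spec_unique_names_of_teaches mentors out) := by unfold Spec_unique_names_of_teaches; infer_instance

-- ===== CLAIM (what is proved, stated in full; the proofs are below) =====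
def Claim_equal_unique_names_of_teaches : Prop := ∀ (mentors : List (List String)), Dom_unique_names_of_teaches mentors → Pre_unique_names_of_teaches mentors → Spec_unique_names_of_teaches mentors (unique_names_of_teaches mentors)

-- ===== LEMMAS AND PROOFS =====

-- recursive characterisation of B's collapse loop: carry the last kept element
def ddLast (last : Option String) : List String → List String
  | [] => []
  | x :: t => if some x = last then ddLast last t else x :: ddLast (some x) t

theorem foldl_dd (l : List String) (acc : List String) :
    l.foldl (fun acc name => if acc = [] ∨ acc.getLast? ≠ some name then acc ++ [name] else acc) acc
      = acc ++ ddLast acc.getLast? l := by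
  induction l generalizing acc with
  | nil => simp [ddLast]
  | cons x t ih =>
    simp only [List.foldl_cons, ddLast]
    by_cases h : some x = acc.getLast?
    · have hacc : ¬ (acc = [] ∨ acc.getLast? ≠ some x) := by
        rcases acc with _ | _ <;> simp_all
      rw [if_neg hacc, if_pos h, ih]
    · have hacc : acc = [] ∨ acc.getLast? ≠ some x := by
        right; exact fun hh => h hh.symm
      rw [if_pos hacc, if_neg h, ih]
      simp [List.getLast?_append]

theorem ddLast_spec (l : List String) (c : Option String)
    (hs : l.Pairwise (· ≤ ·)) (hc : ∀ y ∈ l, ∀ a, c = some a → a ≤ y) :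
    (ddLast c l).Pairwise (· < ·) ∧ (∀ x, x ∈ ddLast c l ↔ x ∈ l ∧ c ≠ some x) := by
  induction l generalizing c with
  | nil => simp [ddLast]
  | cons x t ih =>
    rcases List.pairwise_cons.mp hs with ⟨hxl, hst⟩
    by_cases h : some x = c
    · subst h
      have ih' := ih (some x) hst (by intro y hy a ha; cases ha; exact hxl y hy)
      rw [ddLast, if_pos rfl]
      refine ⟨ih'.1, fun z => ?_⟩
      rw [ih'.2 z]
      simp only [List.mem_cons]
      constructor
      · rintro ⟨hz, hne⟩
        exact ⟨Or.inr hz, hne⟩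
      · rintro ⟨rfl | hz, hne⟩
        · exact (hne rfl).elim
        · exact ⟨hz, hne⟩
    · have ih' := ih (some x) hst (by intro y hy a ha; cases ha; exact hxl y hy)
      rw [ddLast, if_neg h]
      constructor
      · refine List.pairwise_cons.mpr ⟨?_, ih'.1⟩
        intro z hz
        rcases (ih'.2 z).mp hz with ⟨hzt, hzx⟩
        exact lt_of_le_of_ne (hxl z hzt) (fun he => hzx (by rw [he]))
      · intro z
        simp only [List.mem_cons, ih'.2 z]
        constructor
        · rintro (rfl | ⟨hzt, hzx⟩)
          · exact ⟨Or.inl rfl, fun he => h he.symm⟩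
          · refine ⟨Or.inr hzt, fun he => ?_⟩
            -- c = some z, z ∈ t, z ≠ x: then c-bound gives z ≤ x and sortedness x ≤ z, so x = z
            have h1 : z ≤ x := hc x (List.mem_cons_self) z he
            have h2 : x ≤ z := hxl z hzt
            exact hzx (by simp [le_antisymm h2 h1])
        · rintro ⟨rfl | hzt, hne⟩
          · exact Or.inl rfl
          · by_cases hzx : some x = some z
            · exact Or.inl (by injection hzx with h'; exact h'.symm)
            · exact Or.inr ⟨hzt, fun he => hzx (by rw [he])⟩

-- ===== VERDICT (by name: the statement is the Claim_ definition above) =====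
theorem unique_names_of_teaches_spec : Claim_equal_unique_names_of_teaches := by
  intro mentors _hdom _hpre
  unfold Spec_unique_names_of_teaches unique_names_of_teaches unique_names_of_teaches_alt
  simp only []
  -- the two name lists are the same list ns
  have hflat : mentors.foldl (fun acc m => acc ++ m) [] = mentors.flatten := by
    simpa using PySem.List.foldl_append_eq_flatten mentors []
  set f : String → String := fun s => ((PySem.List.pyGet? (PySem.Str.split₀ s) 0).getD "") with hf
  have hnames :
      (mentors.foldl (fun acc m => acc ++ m) []).foldl (fun acc mentor => acc ++ [f mentor]) []
        = mentors.flatMap (fun m => m.map f) := by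
    rw [hflat, PySem.List.foldl_append_singleton_eq_map]
    simp [List.flatMap_def, List.map_flatten]
  set ns := mentors.flatMap (fun m => m.map f) with hns
  -- B's collapsed list
  set srt := PySem.List.sorted ns (fun x => x) false with hsrt
  have hdd := ddLast_spec srt none (by simpa using PySem.List.sorted_pairwise ns (fun x => x))
    (by intro y _ a ha; cases ha)
  have hcollapse := foldl_dd srt []
  simp only [List.nil_append, List.getLast?_nil] at hcollapse
  -- sorted(set(ns)) equals the collapsed list
  have hperm : (ddLast none srt).Perm (PySem.Set.ofList ns) := by
    have hnd : (ddLast none srt).Nodup := hdd.1.imp (fun h => ne_of_lt h)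
    rw [List.perm_ext_iff_of_nodup hnd (PySem.Set.nodup_ofList ns)]
    intro a
    rw [hdd.2 a, PySem.Set.mem_ofList]
    simp [hsrt, PySem.List.mem_sorted]
  have hkey : PySem.List.sorted (PySem.Set.ofList ns) (fun x => x) false = ddLast none srt :=
    PySem.List.sorted_eq_of_perm_of_pairwise_lt (PySem.Set.ofList ns) (ddLast none srt) (fun x => x) hperm (by simpa using hdd.1)
  rw [hnames, hkey, hcollapse]
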